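-- pv_equiv track=rewrite | github.com/SophieRousere/examen.algoritmen | examen algoritmen/introduction/ritsen totaal.py | weven
-- ===== SOURCE A (Python) =====
-- def weven(lijst1, lijst2):
--     """
--     Beurtelings en paarsgewijs samenvoegen van twee reeksen.
--     Stoppen bij het einde van de langste lijst.
--     De kortste lijst wordt herhaald via modulo.
--     """
--     nieuwelijst = []
--     lengte1 = len(lijst1)
--     lengte2 = len(lijst2)
--     max_lengte = max(lengte1, lengte2)
--
--     for i in range(max_lengte):
--         # gebruik modulo om in de kortste lijst terug te gaan naar begin
--         nieuwelijst.append(lijst1[i % lengte1])         # % geeft rest vd deling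
--         nieuwelijst.append(lijst2[i % lengte2])
--         #i = 1, lengte = 3, i % lengte = 1 % 3 = 0 en rest is 1
--
--     return nieuwelijst
-- ===== SOURCE B (Python) =====
-- def weven(lijst1, lijst2):
--     m = max(len(lijst1), len(lijst2))
--     if m == 0:
--         return []
--     ext1 = (lijst1 * (m // len(lijst1) + 1))[:m]
--     ext2 = (lijst2 * (m // len(lijst2) + 1))[:m]
--     return [x for pair in zip(ext1, ext2) for x in pair]
-- ===== Notes on version B (the rewrite author's own statement) =====
-- stated objective: idiomatic
-- what changed: B first materializes both lists extended to the common length (list repetition + slice) and then flattens their zip, instead of A's per-index modulo lookups appended one by one in a loop.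
import Mathlib
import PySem

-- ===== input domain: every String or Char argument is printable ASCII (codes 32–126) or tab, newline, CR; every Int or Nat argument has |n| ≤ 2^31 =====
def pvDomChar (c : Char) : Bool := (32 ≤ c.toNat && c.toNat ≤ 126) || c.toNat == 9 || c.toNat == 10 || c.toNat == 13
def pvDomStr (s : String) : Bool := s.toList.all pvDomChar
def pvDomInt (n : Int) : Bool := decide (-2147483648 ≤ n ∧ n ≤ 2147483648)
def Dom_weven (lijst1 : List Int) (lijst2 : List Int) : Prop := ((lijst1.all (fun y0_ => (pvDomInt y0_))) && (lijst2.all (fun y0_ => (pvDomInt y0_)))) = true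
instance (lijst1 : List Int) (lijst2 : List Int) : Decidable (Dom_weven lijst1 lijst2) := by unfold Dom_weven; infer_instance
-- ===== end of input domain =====

-- B materializes the two lists extended to the common length and flattens their zip,
-- instead of A's per-index modulo lookups; objective: a more idiomatic decomposition, same cost.


-- ===== PORT A =====
def weven (lijst1 : List Int) (lijst2 : List Int) : List Int :=
  let lengte1 : Int := lijst1.length
  let lengte2 : Int := lijst2.length
  let maxLengte : Int := max lengte1 lengte2
  (PySem.List.pyRange 0 maxLengte).foldl
    (fun nieuwelijst i =>
      nieuwelijst ++ [PySem.List.pyGetD lijst1 (PySem.Int.mod i lengte1) 0]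
        ++ [PySem.List.pyGetD lijst2 (PySem.Int.mod i lengte2) 0]) []

-- ===== PORT B =====
-- lijst * k is List.flatten (List.replicate k lijst); [:m] is PySem.List.slice … none (some m)
def weven_alt (lijst1 : List Int) (lijst2 : List Int) : List Int :=
  let m : Int := max (lijst1.length : Int) (lijst2.length : Int)
  if m = 0 then []
  else
    let ext1 := PySem.List.slice
      (List.flatten (List.replicate (PySem.Int.floordiv m lijst1.length + 1).toNat lijst1)) none (some m)
    let ext2 := PySem.List.slice
      (List.flatten (List.replicate (PySem.Int.floordiv m lijst2.length + 1).toNat lijst2)) none (some m)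
    (ext1.zip ext2).flatMap (fun p => [p.1, p.2])

-- ===== PRECONDITION & SPEC =====
-- Pre_ excludes exactly the inputs where one list is empty and the other is not:
-- there A raises ZeroDivisionError (i % 0), and B raises ZeroDivisionError too (m // 0).
def Pre_weven (lijst1 : List Int) (lijst2 : List Int) : Prop := (lijst1 = [] ↔ lijst2 = [])
instance (lijst1 : List Int) (lijst2 : List Int) : Decidable (Pre_weven lijst1 lijst2) := by unfold Pre_weven; infer_instance
def pvWitness_weven : List Int × List Int := ([1, 2, 3], [4, 5])

def Spec_weven (lijst1 : List Int) (lijst2 : List Int) (out : List Int) : Prop := out = weven_alt lijst1 lijst2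
instance (lijst1 : List Int) (lijst2 : List Int) (out : List Int) : Decidable (Spec_weven lijst1 lijst2 out) := by unfold Spec_weven; infer_instance

-- ===== CLAIM (what is proved, stated in full; the proofs are below) =====
def Claim_equal_weven : Prop := ∀ (lijst1 : List Int) (lijst2 : List Int), Dom_weven lijst1 lijst2 → Pre_weven lijst1 lijst2 → Spec_weven lijst1 lijst2 (weven lijst1 lijst2)

-- ===== LEMMAS AND PROOFS =====

-- indexing into the flattening of k copies of l is indexing modulo l.length
theorem getD_flatten_replicate (l : List Int) (k i : Nat)
    (hi : i < k * l.length) :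
    (List.flatten (List.replicate k l)).getD i 0 = l.getD (i % l.length) 0 := by
  induction k generalizing i with
  | zero => omega
  | succ k ih =>
    rw [List.replicate_succ, List.flatten_cons]
    rw [Nat.succ_mul] at hi
    by_cases h : i < l.length
    · rw [List.getD_append _ _ _ _ h, Nat.mod_eq_of_lt h]
    · have hle : l.length ≤ i := by omega
      rw [List.getD_append_right _ _ _ _ hle, ih _ (by omega), Nat.mod_eq_sub_mod hle]

-- the extended list of B is pointwise the modulo-indexed list of A
theorem ext_eq_map_range (l : List Int) (m : Nat) (hn : 0 < l.length) :
    PySem.List.slice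
      (List.flatten (List.replicate (PySem.Int.floordiv (m : Int) l.length + 1).toNat l)) none (some (m : Int))
      = (List.range m).map (fun i => l.getD (i % l.length) 0) := by
  rw [PySem.List.slice_to _ (by positivity), Int.toNat_natCast,
    PySem.Int.floordiv_natCast m l.length, ← Nat.cast_add_one, Int.toNat_natCast]
  have hlen : m ≤ (m / l.length + 1) * l.length := by
    have hdm := Nat.div_add_mod m l.length
    have hmod := Nat.mod_lt m hn
    have hmc := Nat.mul_comm l.length (m / l.length)
    rw [Nat.add_mul, Nat.one_mul]
    omega
  have hflen : (List.flatten (List.replicate (m / l.length + 1) l)).length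
      = (m / l.length + 1) * l.length := by
    simp [Nat.mul_comm]
  apply List.ext_getElem
  · simp [List.length_take, hflen]; omega
  · intro i h1 h2
    have hi : i < m := by simpa using h2
    rw [List.getElem_take]
    have hilen : i < (List.flatten (List.replicate (m / l.length + 1) l)).length := by
      rw [hflen]; omega
    rw [← List.getD_eq_getElem _ 0 hilen,
      getD_flatten_replicate l _ i (by omega),
      List.getElem_map, List.getElem_range,
      List.getD_eq_getElem _ 0 (Nat.mod_lt i hn)]

theorem weven_eq_alt (lijst1 lijst2 : List Int) (hpre : Pre_weven lijst1 lijst2) :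
    weven lijst1 lijst2 = weven_alt lijst1 lijst2 := by
  by_cases h1 : lijst1 = []
  · have h2 : lijst2 = [] := hpre.mp h1
    subst h1 h2; decide
  · have h2 : lijst2 ≠ [] := fun h => h1 (hpre.mpr h)
    have hn1 : 0 < lijst1.length := List.length_pos_iff.mpr h1
    have hn2 : 0 < lijst2.length := List.length_pos_iff.mpr h2
    have hm : 0 < max lijst1.length lijst2.length := by omega
    have hmaxcast : max (lijst1.length : Int) (lijst2.length : Int)
        = ((max lijst1.length lijst2.length : Nat) : Int) := by
      exact_mod_cast (Nat.cast_max ..).symm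
    -- A side
    have hA : weven lijst1 lijst2
        = (List.range (max lijst1.length lijst2.length)).flatMap
            (fun i => [lijst1.getD (i % lijst1.length) 0] ++ [lijst2.getD (i % lijst2.length) 0]) := by
      unfold weven
      simp only [List.append_assoc]
      rw [PySem.List.foldl_append_eq_flatMap
        (fun i => [PySem.List.pyGetD lijst1 (PySem.Int.mod i lijst1.length) 0]
          ++ [PySem.List.pyGetD lijst2 (PySem.Int.mod i lijst2.length) 0])]
      rw [hmaxcast, PySem.List.pyRange_zero_natCast, List.flatMap_map, List.nil_append]
      apply List.flatMap_congr
      intro i _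
      rw [PySem.Int.mod_natCast, PySem.Int.mod_natCast,
        PySem.List.pyGetD_natCast, PySem.List.pyGetD_natCast]
    -- B side
    have hB : weven_alt lijst1 lijst2
        = ((List.range (max lijst1.length lijst2.length)).map
              (fun i => (lijst1.getD (i % lijst1.length) 0, lijst2.getD (i % lijst2.length) 0))).flatMap
            (fun p => [p.1, p.2]) := by
      unfold weven_alt
      simp only [hmaxcast,
        if_neg (show ¬(((max lijst1.length lijst2.length : Nat) : Int) = 0) by
          exact_mod_cast Nat.pos_iff_ne_zero.mp hm),
        ext_eq_map_range lijst1 _ hn1,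
        ext_eq_map_range lijst2 _ hn2,
        List.zip_map']
    rw [hA, hB, List.flatMap_map]
    apply List.flatMap_congr
    intro i _
    rfl

-- ===== VERDICT (by name: the statement is the Claim_ definition above) =====
theorem weven_spec : Claim_equal_weven := by
  intro lijst1 lijst2 _ hpre
  exact weven_eq_alt lijst1 lijst2 hpre
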